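-- pv_equiv track=rewrite | github.com/cheonsol-lee/coding_test | 코딜리티/요기요_3.py | solution
-- ===== SOURCE A (Python) =====
-- def solution(A):
--     num_dict = dict()
--     max_sum = 0
--
--     # A리스트 원소의 인덱스를 리스트로 저장
--     for i, a in enumerate(A):
--         if a not in num_dict:
--             num_dict[a] = [i]
--         else:
--             num_dict[a].append(i)
--
--     for key in num_dict.keys():
--         if len(num_dict[key]) >= 2:
--             arr = num_dict[key]
--             first = arr[0]
--             last = arr[-1]
--             max_sum = max(max_sum, sum(A[first:last+1]))
--
--     if max_sum != 0:
--         return max_sum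
--     else:
--         return -1
--
-- A = [2,2,2,3,2,3]
-- ===== SOURCE B (Python) =====
-- def solution(A):
--     prefix = [0]
--     for x in A:
--         prefix.append(prefix[-1] + x)
--     bounds = dict()
--     for i, a in enumerate(A):
--         bounds[a] = (bounds[a][0], i) if a in bounds else (i, i)
--     best = 0
--     for f, l in bounds.values():
--         if f < l:
--             best = max(best, prefix[l + 1] - prefix[f])
--     return best if best != 0 else -1
-- ===== Notes on version B (the rewrite author's own statement) =====
-- stated objective: faster
-- what changed: B replaces A's per-value index lists with a single prefix-sum array plus one (first,last) index pair per value, so each candidate sum is a O(1) prefix difference instead of A's sum over a slice.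
import Mathlib
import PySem

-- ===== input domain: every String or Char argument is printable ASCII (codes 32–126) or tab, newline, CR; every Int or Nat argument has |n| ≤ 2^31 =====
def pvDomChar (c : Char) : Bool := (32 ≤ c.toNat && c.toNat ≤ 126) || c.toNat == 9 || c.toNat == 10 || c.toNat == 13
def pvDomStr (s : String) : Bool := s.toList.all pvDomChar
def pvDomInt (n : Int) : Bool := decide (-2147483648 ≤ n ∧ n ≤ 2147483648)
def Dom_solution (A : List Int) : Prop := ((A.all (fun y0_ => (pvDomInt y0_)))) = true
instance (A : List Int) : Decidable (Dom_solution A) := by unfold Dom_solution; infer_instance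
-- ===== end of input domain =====

-- B computes each candidate sum as a prefix-sum difference and keeps only (first,last) per value
-- (O(n)) where A stores all indices per value and sums a slice per value (O(n^2)); return values proved equal.

-- ===== PORT A =====
def solution (A : List Int) : Int :=
  -- num_dict: for i, a in enumerate(A): if a not in num_dict: num_dict[a]=[i] else: num_dict[a].append(i)
  let numDict : PySem.Dict Int (List Int) :=
    (PySem.List.enumerate A 0).foldl
      (fun d p =>
        if d.contains p.2 = false then d.insert p.2 [p.1]
        else d.insert p.2 (d.getD p.2 [] ++ [p.1]))   -- .append(i): read, append, store back
      PySem.Dict.empty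
  -- for key in num_dict.keys(): if len(num_dict[key]) >= 2: max_sum = max(max_sum, sum(A[first:last+1]))
  -- num_dict[key] ported as getD key []: exact, every iterated key is present
  let maxSum : Int :=
    numDict.keys.foldl
      (fun m key =>
        if 2 ≤ (numDict.getD key []).length then
          let arr := numDict.getD key []
          let first := PySem.List.pyGetD arr 0 0          -- arr[0]: in range, len arr ≥ 2
          let last := PySem.List.pyGetD arr (-1) 0        -- arr[-1]: in range, len arr ≥ 2
          max m (PySem.List.slice A (some first) (some (last + 1))).sum
        else m) 0
  if maxSum ≠ 0 then maxSum else -1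

-- ===== PORT B =====
def solution_alt (A : List Int) : Int :=
  -- prefix = [0]; for x in A: prefix.append(prefix[-1] + x)
  let pre : List Int := A.foldl (fun p x => p ++ [PySem.List.pyGetD p (-1) 0 + x]) [0]
  -- bounds[a] = (bounds[a][0], i) if a in bounds else (i, i) ; bounds[a][0] ported as (getD a (0,0)).1: exact under the guard
  let bounds : PySem.Dict Int (Int × Int) :=
    (PySem.List.enumerate A 0).foldl
      (fun d p =>
        d.insert p.2 (if d.contains p.2 then ((d.getD p.2 (0, 0)).1, p.1) else (p.1, p.1)))
      PySem.Dict.empty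
  -- for f, l in bounds.values(): if f < l: best = max(best, prefix[l+1] - prefix[f])
  -- prefix[...] ported as pyGetD _ _ 0: indices are in range (0 ≤ f < l+1 ≤ len(A))
  let best : Int :=
    bounds.values.foldl
      (fun b fl =>
        if fl.1 < fl.2 then
          max b (PySem.List.pyGetD pre (fl.2 + 1) 0 - PySem.List.pyGetD pre fl.1 0)
        else b) 0
  if best ≠ 0 then best else -1

-- ===== PRECONDITION & SPEC =====
def Spec_solution (A : List Int) (out : Int) : Prop := out = solution_alt A
instance (A : List Int) (out : Int) : Decidable (Spec_solution A out) := by unfold Spec_solution; infer_instance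

-- ===== CLAIM (what is proved, stated in full; the proofs are below) =====
def Claim_equal_solution : Prop := ∀ (A : List Int), Dom_solution A → Spec_solution A (solution A)

-- ===== LEMMAS AND PROOFS =====

-- the list of indices (as Ints, increasing) at which value k occurs in A
def jsOf (A : List Int) (k : Int) : List Int :=
  ((PySem.List.enumerate A 0).filter (fun p => p.2 == k)).map (·.1)

def psf : Int → List Int → List Int
  | _, [] => []
  | s, x :: xs => (s + x) :: psf (s + x) xs

-- prefix fold characterization
theorem prefix_fold_eq (xs : List Int) : ∀ (p : List Int) (h : p ≠ []),
    xs.foldl (fun p x => p ++ [PySem.List.pyGetD p (-1) 0 + x]) p = p ++ psf (p.getLast h) xs := by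
  induction xs with
  | nil => intro p h; simp [psf]
  | cons x xs ih =>
    intro p h
    simp only [List.foldl_cons]
    rw [show PySem.List.pyGetD p (-1) 0 = p.getLast h from PySem.List.pyGetD_neg_one p 0 h]
    rw [ih (p ++ [p.getLast h + x]) (by simp)]
    rw [List.getLast_append_singleton]
    simp [psf]

theorem psf_getD : ∀ (xs : List Int) (s : Int) (j : Nat), j < xs.length →
    (psf s xs).getD j 0 = s + ((xs.take (j+1)).sum) := by
  intro xs
  induction xs with
  | nil => intro s j h; simp at h
  | cons x xs ih =>
    intro s j h
    cases j with
    | zero => simp [psf]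
    | succ j =>
      simp only [psf, List.getD_cons_succ, List.take_succ_cons, List.sum_cons]
      rw [ih (s + x) j (by simpa using h)]
      ring

theorem pre_getD (A : List Int) (i : Nat) (h : i ≤ A.length) :
    PySem.List.pyGetD (0 :: psf 0 A) (i : Int) 0 = (A.take i).sum := by
  rw [PySem.List.pyGetD_natCast]
  cases i with
  | zero => simp
  | succ j =>
    simp only [List.getD_cons_succ]
    rw [psf_getD A 0 j (by omega)]
    simp

theorem sum_slice (A : List Int) (a b : Nat) (hab : a ≤ b) :
    (PySem.List.slice A (some (a : Int)) (some (b : Int))).sum = (A.take b).sum - (A.take a).sum := by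
  rw [PySem.List.slice_natCast]
  have hb : b = a + (b - a) := by omega
  conv_rhs => rw [hb]
  rw [List.take_add, List.sum_append]
  simp

theorem getLastD_irrel {α : Type} (l : List α) (h : l ≠ []) (a b : α) : l.getLastD a = l.getLastD b := by
  rw [List.getLastD_eq_getLast?, List.getLastD_eq_getLast?]
  cases hl : l.getLast? with
  | none => exact absurd (List.getLast?_eq_none_iff.mp hl) h
  | some x => rfl

theorem afold_get? (l : List (Int × Int)) : ∀ (d : PySem.Dict Int (List Int)) (k : Int),
    (l.foldl (fun d p => if d.contains p.2 = false then d.insert p.2 [p.1]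
        else d.insert p.2 (d.getD p.2 [] ++ [p.1])) d).get? k =
      (if ((l.filter (fun p => p.2 == k)).map (·.1)) = [] then d.get? k
       else some (d.getD k [] ++ (l.filter (fun p => p.2 == k)).map (·.1))) := by
  induction l with
  | nil => intro d k; simp
  | cons p l ih =>
    intro d k
    have hstep : (fun (d : PySem.Dict Int (List Int)) (p : Int × Int) =>
        if d.contains p.2 = false then d.insert p.2 [p.1]
        else d.insert p.2 (d.getD p.2 [] ++ [p.1]))
        = fun d p => d.insert p.2 (if d.contains p.2 = false then [p.1] else d.getD p.2 [] ++ [p.1]) := by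
      funext d p
      by_cases h : d.contains p.2 = false <;> simp [h]
    rw [hstep] at ih ⊢
    simp only [List.foldl_cons]
    by_cases hk : p.2 = k
    · have hfc : List.filter (fun q => q.2 == k) (p :: l) = p :: List.filter (fun q => q.2 == k) l :=
        List.filter_cons_of_pos (by simp [hk])
      rw [ih, hfc, List.map_cons]
      set js' := (l.filter (fun q => q.2 == k)).map (·.1) with hjs'
      have hval : (if d.contains p.2 = false then [p.1] else d.getD p.2 [] ++ [p.1])
          = d.getD k [] ++ [p.1] := by
        subst hk
        by_cases h : d.contains p.2 = false
        · rw [if_pos h, PySem.Dict.getD_of_not_contains d [] h]; rfl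
        · rw [if_neg h]
      have h1 : (d.insert p.2 (if d.contains p.2 = false then [p.1] else d.getD p.2 [] ++ [p.1])).get? k
          = some (d.getD k [] ++ [p.1]) := by
        subst hk; rw [PySem.Dict.get?_insert_self, hval]
      have h2 : (d.insert p.2 (if d.contains p.2 = false then [p.1] else d.getD p.2 [] ++ [p.1])).getD k []
          = d.getD k [] ++ [p.1] := by
        rw [PySem.Dict.getD_eq_get?_getD, h1]; rfl
      by_cases hjs : js' = []
      · rw [if_pos hjs, h1, if_neg (show ¬(p.1 :: js' = []) by simp), hjs]
      · rw [if_neg hjs, h2, if_neg (show ¬(p.1 :: js' = []) by simp), List.append_assoc]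
        rfl
    · have hfc : List.filter (fun q => q.2 == k) (p :: l) = List.filter (fun q => q.2 == k) l :=
        List.filter_cons_of_neg (by simp [hk])
      have h1 : ∀ v, (d.insert p.2 v).get? k = d.get? k :=
        fun v => PySem.Dict.get?_insert_of_ne d v (fun h => hk h.symm)
      have h2 : ∀ v, (d.insert p.2 v).getD k [] = d.getD k [] := by
        intro v; rw [PySem.Dict.getD_eq_get?_getD, h1, ← PySem.Dict.getD_eq_get?_getD]
      rw [ih, hfc, h1, h2]

theorem bfold_get? (l : List (Int × Int)) : ∀ (d : PySem.Dict Int (Int × Int)) (k : Int),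
    (l.foldl (fun d p => d.insert p.2
        (if d.contains p.2 then ((d.getD p.2 (0, 0)).1, p.1) else (p.1, p.1))) d).get? k =
      (if ((l.filter (fun p => p.2 == k)).map (·.1)) = [] then d.get? k
       else some (if d.contains k
         then ((d.getD k (0, 0)).1, ((l.filter (fun p => p.2 == k)).map (·.1)).getLastD 0)
         else (((l.filter (fun p => p.2 == k)).map (·.1)).headD 0,
               ((l.filter (fun p => p.2 == k)).map (·.1)).getLastD 0))) := by
  induction l with
  | nil => intro d k; simp
  | cons p l ih =>
    intro d k
    simp only [List.foldl_cons]
    by_cases hk : p.2 = k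
    · have hfc : List.filter (fun q => q.2 == k) (p :: l) = p :: List.filter (fun q => q.2 == k) l :=
        List.filter_cons_of_pos (by simp [hk])
      rw [ih, hfc, List.map_cons]
      set v : Int × Int := if d.contains p.2 then ((d.getD p.2 (0, 0)).1, p.1) else (p.1, p.1) with hv
      set js' := (l.filter (fun q => q.2 == k)).map (·.1) with hjs'
      have h1 : (d.insert p.2 v).get? k = some v := by subst hk; exact PySem.Dict.get?_insert_self d p.2 v
      have h2 : (d.insert p.2 v).getD k (0,0) = v := by rw [PySem.Dict.getD_eq_get?_getD, h1]; rfl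
      have h3 : (d.insert p.2 v).contains k = true := by
        subst hk; rw [PySem.Dict.contains_insert]; simp
      by_cases hjs : js' = []
      · rw [if_pos hjs, h1, if_neg (show ¬(p.1 :: js' = []) by simp), hjs]
        subst hk
        by_cases hc : d.contains p.2 = true <;> simp [hv, hc]
      · rw [if_neg hjs, h2, if_neg (show ¬(p.1 :: js' = []) by simp), h3, if_pos rfl]
        have hLast : ((p.1 :: js').getLastD 0) = js'.getLastD 0 := by
          rw [List.getLastD_cons]
          exact getLastD_irrel _ hjs _ _
        rw [hLast]
        subst hk
        by_cases hc : d.contains p.2 = true <;> simp [hv, hc]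
    · have hfc : List.filter (fun q => q.2 == k) (p :: l) = List.filter (fun q => q.2 == k) l :=
        List.filter_cons_of_neg (by simp [hk])
      have h1 : ∀ v, (d.insert p.2 v).get? k = d.get? k :=
        fun v => PySem.Dict.get?_insert_of_ne d v (fun h => hk h.symm)
      have h2 : ∀ v, (d.insert p.2 v).getD k (0,0) = d.getD k (0,0) := by
        intro v; rw [PySem.Dict.getD_eq_get?_getD, h1, ← PySem.Dict.getD_eq_get?_getD]
      have h3 : ∀ v, (d.insert p.2 v).contains k = d.contains k := by
        intro v; rw [PySem.Dict.contains_insert]; simp [Ne.symm hk]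
      rw [ih, hfc, h1, h2, h3]

theorem js_mem (A : List Int) (k j : Int) (hj : j ∈ jsOf A k) :
    ∃ m : Nat, j = (m : Int) ∧ m < A.length := by
  unfold jsOf at hj
  obtain ⟨p, hp, rfl⟩ := List.mem_map.mp hj
  have hpe : p ∈ PySem.List.enumerate A 0 := List.mem_of_mem_filter hp
  obtain ⟨m, hm, rfl⟩ := (PySem.List.mem_enumerate_iff A 0 p).mp hpe
  exact ⟨m, by simp, hm⟩

theorem js_ne_nil (A : List Int) (k : Int) (hk : k ∈ A) : jsOf A k ≠ [] := by
  obtain ⟨m, hm, hAm⟩ := List.getElem_of_mem hk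
  have hpe : ((0 + (m : Int), A[m]) : Int × Int) ∈ PySem.List.enumerate A 0 :=
    (PySem.List.mem_enumerate_iff A 0 _).mpr ⟨m, hm, rfl⟩
  have hpf : ((0 + (m : Int), A[m]) : Int × Int) ∈ (PySem.List.enumerate A 0).filter (fun p => p.2 == k) :=
    List.mem_filter.mpr ⟨hpe, by simp [hAm]⟩
  exact List.ne_nil_of_mem (List.mem_map.mpr ⟨_, hpf, rfl⟩)

theorem js_pairwise (A : List Int) (k : Int) : (jsOf A k).Pairwise (· < ·) := by
  unfold jsOf
  rw [List.pairwise_map]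
  exact List.Pairwise.filter _ (PySem.List.pairwise_lt_enumerate A 0)

-- pointwise equality of the two loop bodies, for every key that occurs in A
theorem contrib (A : List Int) (k : Int) (hk : k ∈ A) (m : Int) :
    (if 2 ≤ (jsOf A k).length then
        max m (PySem.List.slice A (some (PySem.List.pyGetD (jsOf A k) 0 0))
          (some (PySem.List.pyGetD (jsOf A k) (-1) 0 + 1))).sum
     else m)
    = (if (jsOf A k).headD 0 < (jsOf A k).getLastD 0 then
        max m (PySem.List.pyGetD (0 :: psf 0 A) ((jsOf A k).getLastD 0 + 1) 0
               - PySem.List.pyGetD (0 :: psf 0 A) ((jsOf A k).headD 0) 0)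
       else m) := by
  have hne := js_ne_nil A k hk
  have hpw := js_pairwise A k
  have hmem := js_mem A k
  cases hjs : jsOf A k with
  | nil => exact absurd hjs hne
  | cons x t =>
    rw [hjs] at hpw
    cases t with
    | nil =>
      rw [if_neg (by simp), if_neg (by simp)]
    | cons y t2 =>
      rw [if_pos (by simp)]
      have htne : (y :: t2 : List Int) ≠ [] := by simp
      have hL : (x :: y :: t2).getLast (by simp) = (y :: t2).getLast htne := by
        rw [List.getLast_cons htne]
      have hLmem : (y :: t2).getLast htne ∈ (y :: t2) := List.getLast_mem htne
      set L := (y :: t2).getLast htne with hLdef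
      have hxL : x < L := (List.pairwise_cons.mp hpw).1 L hLmem
      have hlast : (x :: y :: t2).getLastD 0 = L := by
        rw [List.getLastD_eq_getLast?, List.getLast?_eq_some_getLast (by simp), Option.getD_some, hL]
      have hgetneg : PySem.List.pyGetD (x :: y :: t2) (-1) 0 = L := by
        rw [PySem.List.pyGetD_neg_one _ 0 (by simp), hL]
      have hget0 : PySem.List.pyGetD (x :: y :: t2) 0 0 = x := PySem.List.pyGetD_zero_cons _ _ _
      have hhead : (x :: y :: t2).headD 0 = x := rfl
      rw [if_pos (by rw [hhead, hlast]; exact hxL)]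
      obtain ⟨aN, haN, haNlt⟩ := hmem x (by rw [hjs]; simp)
      obtain ⟨bN, hbN, hbNlt⟩ := hmem L (by rw [hjs]; exact List.mem_cons_of_mem _ hLmem)
      rw [hget0, hgetneg, hhead, hlast, haN, hbN]
      have hcast : ((bN : Int) + 1) = ((bN + 1 : Nat) : Int) := by push_cast; ring
      rw [hcast, sum_slice A aN (bN + 1) (by omega),
          pre_getD A (bN + 1) (by omega), pre_getD A aN (by omega)]

theorem astep_eq : (fun (d : PySem.Dict Int (List Int)) (p : Int × Int) =>
    if d.contains p.2 = false then d.insert p.2 [p.1]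
    else d.insert p.2 (d.getD p.2 [] ++ [p.1]))
    = fun d p => d.insert p.2 (if d.contains p.2 = false then [p.1] else d.getD p.2 [] ++ [p.1]) := by
  funext d p
  by_cases h : d.contains p.2 = false <;> simp [h]

theorem main_eq (A : List Int) : solution A = solution_alt A := by
  simp only [solution, solution_alt]
  rw [astep_eq]
  set dA := (PySem.List.enumerate A 0).foldl
    (fun d p => d.insert p.2 (if d.contains p.2 = false then [p.1] else d.getD p.2 [] ++ [p.1]))
    PySem.Dict.empty with hdA
  set dB := (PySem.List.enumerate A 0).foldl
    (fun d p => d.insert p.2 (if d.contains p.2 then ((d.getD p.2 (0, 0)).1, p.1) else (p.1, p.1)))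
    PySem.Dict.empty with hdB
  have h_pre : A.foldl (fun p x => p ++ [PySem.List.pyGetD p (-1) 0 + x]) [0] = 0 :: psf 0 A := by
    rw [prefix_fold_eq A [0] (by simp)]
    rfl
  have h_keysA : dA.keys = PySem.Set.ofList A := by
    rw [hdA, PySem.Dict.keys_foldl_insert_key (PySem.List.enumerate A 0) (fun p => p.2) _
        PySem.Dict.empty, PySem.Dict.keys_empty, PySem.Set.update_nil_left,
        PySem.List.map_snd_enumerate]
  have h_keysB : dB.keys = PySem.Set.ofList A := by
    rw [hdB, PySem.Dict.keys_foldl_insert_key (PySem.List.enumerate A 0) (fun p => p.2) _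
        PySem.Dict.empty, PySem.Dict.keys_empty, PySem.Set.update_nil_left,
        PySem.List.map_snd_enumerate]
  have h_nodB : dB.keys.Nodup := by
    rw [h_keysB]; exact PySem.Set.nodup_ofList A
  have h_getA : ∀ k, dA.getD k [] = jsOf A k := by
    intro k
    rw [hdA, ← astep_eq, PySem.Dict.getD_eq_get?_getD, afold_get?]
    by_cases h : jsOf A k = []
    · rw [if_pos (show ((PySem.List.enumerate A 0).filter (fun p => p.2 == k)).map (·.1) = [] from h),
          PySem.Dict.get?_empty, h]
      rfl
    · rw [if_neg (show ¬((PySem.List.enumerate A 0).filter (fun p => p.2 == k)).map (·.1) = [] from h),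
          Option.getD_some, PySem.Dict.getD_empty]
      rfl
  have h_getB : ∀ k, k ∈ A → dB.getD k (0, 0) = ((jsOf A k).headD 0, (jsOf A k).getLastD 0) := by
    intro k hk
    have h := js_ne_nil A k hk
    rw [hdB, PySem.Dict.getD_eq_get?_getD, bfold_get?]
    rw [if_neg (show ¬((PySem.List.enumerate A 0).filter (fun p => p.2 == k)).map (·.1) = [] from h),
        Option.getD_some, if_neg (by rw [PySem.Dict.contains_empty]; simp)]
    rfl
  have h_fold : dA.keys.foldl
      (fun m key => if 2 ≤ (dA.getD key []).length then
        max m (PySem.List.slice A (some (PySem.List.pyGetD (dA.getD key []) 0 0))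
          (some (PySem.List.pyGetD (dA.getD key []) (-1) 0 + 1))).sum
      else m) 0
      = dB.values.foldl
      (fun b fl => if fl.1 < fl.2 then
        max b (PySem.List.pyGetD (A.foldl (fun p x => p ++ [PySem.List.pyGetD p (-1) 0 + x]) [0]) (fl.2 + 1) 0
               - PySem.List.pyGetD (A.foldl (fun p x => p ++ [PySem.List.pyGetD p (-1) 0 + x]) [0]) fl.1 0)
      else b) 0 := by
    rw [PySem.Dict.values_eq_map_keys dB h_nodB (0, 0), List.foldl_map, h_keysA, h_keysB, h_pre]
    apply PySem.List.foldl_congr_mem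
    intro m k hkmem
    have hk : k ∈ A := (PySem.Set.mem_ofList A k).mp hkmem
    rw [h_getA, h_getB k hk]
    exact contrib A k hk m
  rw [h_fold]

-- ===== VERDICT (by name: the statement is the Claim_ definition above) =====
theorem solution_spec : Claim_equal_solution := by
  intro A _
  unfold Spec_solution
  exact main_eq A
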